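-- pv_equiv track=rewrite | github.com/MJ-SEO/py_fuzz | pythonfuzz/mutate.py | could_be_bitflip
-- ===== SOURCE A (Python) =====
-- def could_be_bitflip(diff):
--     if diff == 0 :
--         return False
--
--     while not (diff & 0x1):
--         diff = diff >> 1
--
--     # if 1, 2, 4 bit flip
--     if diff == 0x1 or diff == 0x3 or diff == 0xf:
--         return True
--
--     # if 8bit flip
--     if diff == 0xff:
--         return True
--
--     return False
-- ===== SOURCE B (Python) =====
-- def could_be_bitflip(diff):
--     if diff <= 0:
--         return False
--     return any(diff == c << k
--                for c in (1, 3, 15, 255)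
--                for k in range(diff.bit_length()))
-- ===== Notes on version B (the rewrite author's own statement) =====
-- stated objective: alternative
-- what changed: Replaces A's trailing-zero stripping while-loop plus membership test by a loop-free positivity guard and a direct any() search for diff equal to one of the four flip patterns shifted by each k up to diff.bit_length().
import Mathlib
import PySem

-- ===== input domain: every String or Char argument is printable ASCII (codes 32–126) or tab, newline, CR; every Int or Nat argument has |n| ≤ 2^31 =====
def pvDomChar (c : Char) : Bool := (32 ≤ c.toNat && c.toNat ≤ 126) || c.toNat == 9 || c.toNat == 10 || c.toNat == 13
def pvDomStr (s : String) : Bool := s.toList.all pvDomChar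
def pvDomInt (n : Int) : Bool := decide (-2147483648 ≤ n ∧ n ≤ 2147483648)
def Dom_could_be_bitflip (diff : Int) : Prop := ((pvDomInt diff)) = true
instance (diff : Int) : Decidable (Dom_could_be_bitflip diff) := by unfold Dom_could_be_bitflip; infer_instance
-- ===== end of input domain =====

-- B replaces A's trailing-zero stripping while-loop by a direct search over shifts of the four
-- flip patterns (alternative decomposition, similar cost on these small ints).

-- ===== PORT A =====
-- the while loop: while not (diff & 0x1): diff = diff >> 1
-- (Python's `d & 1` is PySem.Int.band d 1, `d >> 1` is d >>> 1; the Nat fuel is a totality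
--  guard only: each iteration halves |d|, so |d| steps always suffice — proved by
--  pyStripGo_eq_stripRef below, which shows the fuel is never exhausted)
def pyStripGo : Nat → Int → Int
  | 0, d => d
  | n + 1, d => if PySem.Int.band d 1 == 0 then pyStripGo n (d >>> (1 : Nat)) else d

def pyStrip (d : Int) : Int := pyStripGo d.natAbs d

def could_be_bitflip (diff : Int) : Bool :=
  if diff == 0 then false
  else
    let d := pyStrip diff
    if d == 0x1 || d == 0x3 || d == 0xf then true
    else if d == 0xff then true
    else false

-- ===== PORT B =====
-- Source B: if diff <= 0: return False
--       return any(diff == c << k for c in (1, 3, 15, 255) for k in range(diff.bit_length()))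
-- (range over the Nat diff.bit_length() is List.range; `c << k` is c <<< k)
def could_be_bitflip_alt (diff : Int) : Bool :=
  if diff ≤ 0 then false
  else [(1 : Int), 3, 15, 255].any (fun c =>
    (List.range (PySem.Int.bitLength diff)).any (fun k => diff == c <<< k))

-- ===== PRECONDITION & SPEC =====
def Spec_could_be_bitflip (diff : Int) (out : Bool) : Prop := out = could_be_bitflip_alt diff
instance (diff : Int) (out : Bool) : Decidable (Spec_could_be_bitflip diff out) := by unfold Spec_could_be_bitflip; infer_instance

-- ===== CLAIM (what is proved, stated in full; the proofs are below) =====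
def Claim_equal_could_be_bitflip : Prop := ∀ (diff : Int), Dom_could_be_bitflip diff → Spec_could_be_bitflip diff (could_be_bitflip diff)

-- ===== LEMMAS AND PROOFS =====

theorem band_one_emod (d : Int) : PySem.Int.band d 1 = d % 2 := by
  rw [PySem.Int.band_one, PySem.Int.mod_eq_emod_of_pos (by omega)]

theorem shiftR_one (d : Int) : d >>> (1 : Nat) = d / 2 := by
  simpa using Int.shiftRight_eq_div_pow d 1

-- proof-side reference version of the stripping loop (well-founded on |d|)
def stripRef (d : Int) : Int :=
  if _h0 : d = 0 then 0
  else if d % 2 = 0 then stripRef (d / 2) else d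
termination_by d.natAbs
decreasing_by omega

theorem stripRef_even {d : Int} (hd : d ≠ 0) (he : d % 2 = 0) : stripRef d = stripRef (d / 2) := by
  rw [stripRef, dif_neg hd, if_pos he]

theorem stripRef_odd {d : Int} (ho : d % 2 = 1) : stripRef d = d := by
  rw [stripRef, dif_neg (by omega), if_neg (by omega)]

-- the fuel |d| always suffices: pyStripGo agrees with the reference loop
theorem pyStripGo_eq_stripRef : ∀ (n : Nat) (d : Int), d ≠ 0 → d.natAbs ≤ n → pyStripGo n d = stripRef d := by
  intro n
  induction n with
  | zero => intro d hd hle; exact absurd (by omega : d = 0) hd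
  | succ n ih =>
    intro d hd hle
    by_cases he : d % 2 = 0
    · have hb : (PySem.Int.band d 1 == 0) = true := by simp [band_one_emod, he]
      rw [pyStripGo, hb, if_pos rfl, shiftR_one,
          ih (d / 2) (by omega) (by omega), stripRef_even hd he]
    · have hb : (PySem.Int.band d 1 == 0) = false := by simp [band_one_emod]; omega
      rw [pyStripGo, hb, if_neg (by simp), stripRef_odd (by omega)]

theorem pyStrip_eq_stripRef (d : Int) : pyStrip d = stripRef d := by
  by_cases hd : d = 0
  · subst hd; rw [pyStrip, stripRef]; rfl
  · exact pyStripGo_eq_stripRef d.natAbs d hd le_rfl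

-- the stripped value of a negative number is negative
theorem stripRef_neg (d : Int) (h : d < 0) : stripRef d < 0 := by
  by_cases he : d % 2 = 0
  · rw [stripRef_even (by omega) he]
    exact stripRef_neg (d / 2) (by omega)
  · rw [stripRef_odd (by omega)]
    exact h
termination_by d.natAbs
decreasing_by omega

-- decomposition: a positive d is (stripRef d) · 2^k with 2^k ≤ d, and stripRef d is odd
theorem stripRef_decomp (d : Int) (h : 0 < d) :
    ∃ k : Nat, d = stripRef d * 2 ^ k ∧ (2 : Int) ^ k ≤ d ∧ stripRef d % 2 = 1 := by
  by_cases he : d % 2 = 0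
  · obtain ⟨k, hk1, hk2, hk3⟩ := stripRef_decomp (d / 2) (by omega)
    have hsd : stripRef d = stripRef (d / 2) := stripRef_even (by omega) he
    refine ⟨k + 1, ?_, ?_, by rw [hsd]; exact hk3⟩
    · calc d = 2 * (d / 2) := by omega
        _ = 2 * (stripRef (d / 2) * 2 ^ k) := by rw [← hk1]
        _ = stripRef (d / 2) * 2 ^ (k + 1) := by ring
        _ = stripRef d * 2 ^ (k + 1) := by rw [hsd]
    · rw [pow_succ]
      omega
  · rw [stripRef_odd (by omega)]
    exact ⟨0, by simp, by simpa using h, by omega⟩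
termination_by d.natAbs
decreasing_by omega

-- stripping an odd positive c times a power of two gives back c
theorem stripRef_mul_pow (c : Int) (hc : 0 < c) (ho : c % 2 = 1) :
    ∀ (k : Nat), stripRef (c * 2 ^ k) = c := by
  intro k
  induction k with
  | zero => simpa using stripRef_odd ho
  | succ k ih =>
    have hne : c * 2 ^ (k + 1) ≠ 0 := by positivity
    have he : c * 2 ^ (k + 1) % 2 = 0 := by
      have : (2 : Int) ∣ c * 2 ^ (k + 1) := ⟨c * 2 ^ k, by ring⟩
      omega
    have hdiv : c * 2 ^ (k + 1) / 2 = c * 2 ^ k := by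
      rw [pow_succ, ← mul_assoc]
      exact Int.mul_ediv_cancel _ (by norm_num)
    rw [stripRef_even hne he, hdiv, ih]

-- k < bitLength: from 2^k ≤ d and d.natAbs < 2^(bitLength d)
theorem lt_bitLength_of_pow_le {d : Int} (h : 0 < d) {k : Nat} (hk : (2 : Int) ^ k ≤ d) :
    k < PySem.Int.bitLength d := by
  have h1 := PySem.Int.lt_two_pow_bitLength d
  have h3 : (2 : Int) ^ k < (2 : Int) ^ PySem.Int.bitLength d := by
    calc (2 : Int) ^ k ≤ d := hk
      _ = (d.natAbs : Int) := by omega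
      _ < ((2 ^ PySem.Int.bitLength d : Nat) : Int) := by exact_mod_cast h1
      _ = (2 : Int) ^ PySem.Int.bitLength d := by push_cast; ring
  exact (pow_lt_pow_iff_right₀ (by norm_num)).mp h3

-- A's result for positive input: membership of the stripped value in the four patterns
theorem could_be_bitflip_pos {d : Int} (h : 0 < d) :
    could_be_bitflip d = true ↔
      (stripRef d = 1 ∨ stripRef d = 3 ∨ stripRef d = 15 ∨ stripRef d = 255) := by
  have h0 : (d == 0) = false := by simp; omega
  simp only [could_be_bitflip, h0, Bool.false_eq_true, if_false, pyStrip_eq_stripRef]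
  constructor
  · intro hh
    split_ifs at hh with h1 h2
    · simp at h1; tauto
    · simp at h2; tauto
  · intro hh
    split_ifs with h1 h2
    · rfl
    · rfl
    · simp at h1 h2; tauto

-- B's result for positive input: an existential over the searched shifts
theorem could_be_bitflip_alt_pos {d : Int} (h : 0 < d) :
    could_be_bitflip_alt d = true ↔
      ∃ c ∈ [(1 : Int), 3, 15, 255], ∃ k, k < PySem.Int.bitLength d ∧ d = c * 2 ^ k := by
  simp [could_be_bitflip_alt, not_le.mpr h, List.any_eq_true, Int.shiftLeft_eq]

-- ===== VERDICT (by name: the statement is the Claim_ definition above) =====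
theorem could_be_bitflip_spec : Claim_equal_could_be_bitflip := by
  intro diff _
  unfold Spec_could_be_bitflip
  rcases lt_trichotomy diff 0 with hlt | heq | hgt
  · -- negative input: A strips to a negative odd value, B's guard fires; both false
    have hs := stripRef_neg diff hlt
    have hA : could_be_bitflip diff = false := by
      have h0 : (diff == 0) = false := by simp; omega
      simp only [could_be_bitflip, h0, Bool.false_eq_true, if_false, pyStrip_eq_stripRef]
      split_ifs with h1 h2
      · simp at h1; omega
      · simp at h2; omega
      · rfl
    have hB : could_be_bitflip_alt diff = false := by
      simp [could_be_bitflip_alt, hlt.le]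
    rw [hA, hB]
  · subst heq; rfl
  · -- positive input
    rw [Bool.eq_iff_iff, could_be_bitflip_pos hgt, could_be_bitflip_alt_pos hgt]
    constructor
    · intro h
      obtain ⟨k, hk1, hk2, hk3⟩ := stripRef_decomp diff hgt
      have hkbl := lt_bitLength_of_pow_le hgt hk2
      rcases h with h | h | h | h <;>
        exact ⟨stripRef diff, by simp [h], k, hkbl, hk1⟩
    · rintro ⟨c, hc, k, hk, hd⟩
      simp only [List.mem_cons, List.not_mem_nil, or_false] at hc
      have hco : 0 < c ∧ c % 2 = 1 := by
        rcases hc with rfl | rfl | rfl | rfl <;> norm_num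
      have hsc := stripRef_mul_pow c hco.1 hco.2 k
      rw [← hd] at hsc
      rw [hsc]
      tauto
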